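-- pv_equiv track=rewrite | github.com/in-sukim/Coding_Test | 프로그래머스/2/87390. n＾2 배열 자르기/n＾2 배열 자르기.py | solution
-- ===== SOURCE A (Python) =====
-- def solution(n, left, right):
--     result = []
--     for i in range(left, right + 1):
--         row = i // n
--         col = i % n
--         value = max(row + 1, col + 1)
--         result.append(value)
--     return result
-- ===== SOURCE B (Python) =====
-- def solution(n, left, right):
--     start_row = left // n
--     end_row = right // n
--     result = []
--     for r in range(start_row, end_row + 1):
--         c0 = left - r * n if r == start_row else 0
--         c1 = right - r * n if r == end_row else n - 1
--         for c in range(c0, c1 + 1):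
--             result.append(max(r + 1, c + 1))
--     return result
-- ===== Notes on version B (the rewrite author's own statement) =====
-- stated objective: alternative
-- what changed: Replaces A's flat scan over i in [left,right] with per-i floor-division and modulo by a per-row decomposition: it computes the first and last row indices once and emits each row's contiguous column segment with no division in the inner loop.
-- outside the precondition, e.g. on solution(-2, 0, 3): A returns [1, 0, 1, 0], B returns []
import Mathlib
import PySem

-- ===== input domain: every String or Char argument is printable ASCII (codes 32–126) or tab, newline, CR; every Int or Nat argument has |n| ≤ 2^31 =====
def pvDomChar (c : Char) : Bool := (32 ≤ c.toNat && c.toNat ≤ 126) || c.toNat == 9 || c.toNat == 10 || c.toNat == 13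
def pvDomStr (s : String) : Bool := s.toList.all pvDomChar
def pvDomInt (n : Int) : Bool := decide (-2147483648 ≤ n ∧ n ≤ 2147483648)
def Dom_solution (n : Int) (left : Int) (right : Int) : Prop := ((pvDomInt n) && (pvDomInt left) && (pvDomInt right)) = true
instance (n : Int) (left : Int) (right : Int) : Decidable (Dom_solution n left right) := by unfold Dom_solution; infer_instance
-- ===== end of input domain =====

-- B replaces the flat scan (one floordiv/mod per element) with a per-row decomposition;
-- objective: alternative (same cost, different structure).

-- ===== PORT A =====
def solution (n : Int) (left : Int) (right : Int) : List Int :=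
  (PySem.List.pyRange left (right + 1) 1).foldl (fun result i =>
    let row := PySem.Int.floordiv i n
    let col := PySem.Int.mod i n
    let value := max (row + 1) (col + 1)
    result ++ [value]) []

-- ===== PORT B =====
def solution_alt (n : Int) (left : Int) (right : Int) : List Int :=
  let startRow := PySem.Int.floordiv left n
  let endRow := PySem.Int.floordiv right n
  (PySem.List.pyRange startRow (endRow + 1) 1).foldl (fun result r =>
    let c0 := if r = startRow then left - r * n else 0
    let c1 := if r = endRow then right - r * n else n - 1
    (PySem.List.pyRange c0 (c1 + 1) 1).foldl (fun res c =>
      res ++ [max (r + 1) (c + 1)]) result) []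

-- ===== PRECONDITION & SPEC =====
-- Pre_ excludes n ≤ 0: at n = 0 both A and B raise ZeroDivisionError, and a non-positive
-- grid size is outside the problem's domain (n is the side length of an n×n grid);
-- for negative n A returns floor-division artefacts B does not reproduce.
def Pre_solution (n : Int) (left : Int) (right : Int) : Prop := 1 ≤ n
instance (n : Int) (left : Int) (right : Int) : Decidable (Pre_solution n left right) := by unfold Pre_solution; infer_instance
def pvWitness_solution : Int × Int × Int := (3, 2, 5)
def Spec_solution (n : Int) (left : Int) (right : Int) (out : List Int) : Prop := out = solution_alt n left right
instance (n : Int) (left : Int) (right : Int) (out : List Int) : Decidable (Spec_solution n left right out) := by unfold Spec_solution; infer_instance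

-- ===== CLAIM (what is proved, stated in full; the proofs are below) =====
def Claim_equal_solution : Prop := ∀ (n : Int) (left : Int) (right : Int), Dom_solution n left right → Pre_solution n left right → Spec_solution n left right (solution n left right)

-- ===== LEMMAS AND PROOFS =====

-- the per-element value A computes
def pvVal (n i : Int) : Int := max (PySem.Int.floordiv i n + 1) (PySem.Int.mod i n + 1)

theorem pvA_eq_map (n left right : Int) :
    solution n left right = (PySem.List.pyRange left (right + 1) 1).map (pvVal n) := by
  unfold solution
  rw [PySem.List.foldl_append_singleton_eq_map]
  rfl

-- floor division is monotone for a positive divisor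
theorem pvFloordiv_mono (n a b : Int) (hn : 0 < n) (h : a ≤ b) :
    PySem.Int.floordiv a n ≤ PySem.Int.floordiv b n := by
  rw [PySem.Int.floordiv_eq_ediv_of_pos hn, PySem.Int.floordiv_eq_ediv_of_pos hn]
  exact Int.ediv_le_ediv hn h

theorem pvMod_eq (n i : Int) : PySem.Int.mod i n = i - PySem.Int.floordiv i n * n := by
  have := PySem.Int.floordiv_mul_add_mod i n
  omega

-- one row's segment: A's values over [a,b) ⊆ row r equal B's column map
theorem pvRow_map (n r a b : Int) (hn : 0 < n) (ha : r * n ≤ a) (hb : b ≤ (r + 1) * n) :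
    (PySem.List.pyRange a b 1).map (pvVal n)
      = (PySem.List.pyRange (a - r * n) (b - r * n) 1).map (fun c => max (r + 1) (c + 1)) := by
  rw [PySem.List.pyRange_one, PySem.List.pyRange_one]
  have hlen : (b - a).toNat = (b - r * n - (a - r * n)).toNat := by omega
  rw [List.map_map, List.map_map, ← hlen]
  apply List.map_congr_left
  intro k hk
  have hk' : (k : Int) < b - a := by
    have := List.mem_range.mp hk
    omega
  have hfl : PySem.Int.floordiv (a + k) n = r := by
    rw [PySem.Int.floordiv_eq_iff_of_pos hn]
    constructor <;> omega
  have hmod := pvMod_eq n (a + k)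
  simp only [Function.comp_apply, pvVal, hfl, hmod]
  omega

-- B as a foldl with an explicit row body; acc is generalized for the induction
def pvBody (n sr er left right : Int) (result : List Int) (r : Int) : List Int :=
  let c0 := if r = sr then left - r * n else 0
  let c1 := if r = er then right - r * n else n - 1
  (PySem.List.pyRange c0 (c1 + 1) 1).foldl (fun res c => res ++ [max (r + 1) (c + 1)]) result

theorem pvMain (n : Int) (hn : 0 < n) :
    ∀ (k : Nat) (left right : Int) (acc : List Int),
      k = (PySem.Int.floordiv right n + 1 - PySem.Int.floordiv left n).toNat →
      (PySem.List.pyRange (PySem.Int.floordiv left n) (PySem.Int.floordiv right n + 1) 1).foldl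
          (pvBody n (PySem.Int.floordiv left n) (PySem.Int.floordiv right n) left right) acc
        = acc ++ (PySem.List.pyRange left (right + 1) 1).map (pvVal n) := by
  intro k
  induction k with
  | zero =>
    intro left right acc hk
    set sr := PySem.Int.floordiv left n with hsr
    set er := PySem.Int.floordiv right n with her
    have h1 : er + 1 ≤ sr := by omega
    have h2 : right < left := by
      by_contra h
      have := pvFloordiv_mono n left right hn (by omega)
      omega
    rw [PySem.List.pyRange_one_eq_nil (by omega), PySem.List.pyRange_one_eq_nil (by omega)]
    simp
  | succ k ih =>
    intro left right acc hk
    set sr := PySem.Int.floordiv left n with hsr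
    set er := PySem.Int.floordiv right n with her
    have hsrer : sr ≤ er := by omega
    have hla : sr * n ≤ left ∧ left < (sr + 1) * n := by
      have := (PySem.Int.floordiv_eq_iff_of_pos hn (a := left) (b := n) (q := sr)).mp hsr.symm
      omega
    have hra : er * n ≤ right ∧ right < (er + 1) * n := by
      have := (PySem.Int.floordiv_eq_iff_of_pos hn (a := right) (b := n) (q := er)).mp her.symm
      omega
    rw [PySem.List.pyRange_one_cons (by omega)]
    simp only [List.foldl_cons]
    by_cases hse : sr = er
    · -- single row: the whole slice lies in row sr
      rw [PySem.List.pyRange_one_eq_nil (by omega)]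
      rw [← hse] at hra
      simp only [List.foldl_nil, pvBody, if_pos hse, if_true]
      rw [PySem.List.foldl_append_singleton_eq_map]
      rw [pvRow_map n sr left (right + 1) hn (by omega) (by omega)]
      have h3 : right - sr * n + 1 = right + 1 - sr * n := by ring
      rw [h3]
    · -- sr < er: peel the (partial) first row, recurse on left' = (sr+1)*n
      have hsre : sr < er := lt_of_le_of_ne hsrer hse
      have hsr' : PySem.Int.floordiv ((sr + 1) * n) n = sr + 1 := by
        rw [PySem.Int.floordiv_eq_iff_of_pos hn]
        constructor
        · omega
        · nlinarith
      have hmul : (sr + 1) * n ≤ er * n :=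
        mul_le_mul_of_nonneg_right (by omega) (le_of_lt hn)
      have hle : (sr + 1) * n ≤ right + 1 := by omega
      -- split A's range at the row boundary
      rw [PySem.List.pyRange_one_append left ((sr + 1) * n) (right + 1) (by omega) hle,
        List.map_append]
      -- first row's contribution
      have hfirst : pvBody n sr er left right acc sr
          = acc ++ (PySem.List.pyRange left ((sr + 1) * n) 1).map (pvVal n) := by
        simp only [pvBody, if_neg hse, if_true]
        rw [PySem.List.foldl_append_singleton_eq_map]
        rw [pvRow_map n sr left ((sr + 1) * n) hn (by omega) (by omega)]
        have : (sr + 1) * n - sr * n = n - 1 + 1 := by ring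
        rw [this]
      rw [hfirst]
      -- the remaining rows use the same body as the recursive call's body
      have hcongr :
          (PySem.List.pyRange (sr + 1) (er + 1) 1).foldl (pvBody n sr er left right)
              (acc ++ (PySem.List.pyRange left ((sr + 1) * n) 1).map (pvVal n))
            = (PySem.List.pyRange (sr + 1) (er + 1) 1).foldl
              (pvBody n (sr + 1) er ((sr + 1) * n) right)
              (acc ++ (PySem.List.pyRange left ((sr + 1) * n) 1).map (pvVal n)) := by
        apply PySem.List.foldl_congr_mem
        intro a r hr
        have hmem := (PySem.List.mem_pyRange_one (a := sr + 1) (b := er + 1) (x := r)).mp hr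
        simp only [pvBody]
        have h1 : (r = sr) = False := by simp; omega
        by_cases h2 : r = sr + 1
        · subst h2
          simp only [h1, if_false, if_true]
          have : (sr + 1) * n - (sr + 1) * n = 0 := by ring
          rw [this]
        · have h2' : (r = sr + 1) = False := by simp [h2]
          simp only [h1, h2', if_false]
      rw [hcongr]
      have := ih ((sr + 1) * n) right
        (acc ++ (PySem.List.pyRange left ((sr + 1) * n) 1).map (pvVal n))
        (by rw [hsr', ← her]; omega)
      rw [hsr', ← her] at this
      rw [this, List.append_assoc]

-- ===== VERDICT (by name: the statement is the Claim_ definition above) =====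
theorem solution_spec : Claim_equal_solution := by
  intro n left right _ hpre
  unfold Spec_solution
  have hn : 0 < n := hpre
  rw [pvA_eq_map]
  unfold solution_alt
  have h := pvMain n hn
    (PySem.Int.floordiv right n + 1 - PySem.Int.floordiv left n).toNat left right [] rfl
  simp only [List.nil_append] at h
  rw [← h]
  rfl
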